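-- pv_equiv track=rewrite | github.com/hungair0925/AtCoder | ABC091/B.py | is_all_minus
-- ===== SOURCE A (Python) =====
-- def is_all_minus(values):
--     bool_arrays = []
--     for value in values:
--         if value < 0:
--             bool_arrays.append(True)
--         else:
--             bool_arrays.append(False)
--     return all(bool_arrays)
-- ===== SOURCE B (Python) =====
-- def is_all_minus(values):
--     return not values or max(values) < 0
-- ===== Notes on version B (the rewrite author's own statement) =====
-- stated objective: simpler
-- what changed: Replaces the per-element boolean-list construction plus all() with a single aggregate: empty list returns True, otherwise compare max(values) < 0.
import Mathlib
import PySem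

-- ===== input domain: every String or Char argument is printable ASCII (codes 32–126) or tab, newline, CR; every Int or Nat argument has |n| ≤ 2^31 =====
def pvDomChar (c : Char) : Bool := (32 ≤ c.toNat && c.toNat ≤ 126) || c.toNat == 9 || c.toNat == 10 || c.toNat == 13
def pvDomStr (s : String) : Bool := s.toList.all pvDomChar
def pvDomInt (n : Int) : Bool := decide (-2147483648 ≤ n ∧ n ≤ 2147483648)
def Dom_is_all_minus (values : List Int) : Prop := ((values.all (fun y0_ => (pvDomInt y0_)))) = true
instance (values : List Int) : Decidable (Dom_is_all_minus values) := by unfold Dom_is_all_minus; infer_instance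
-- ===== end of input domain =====

-- B replaces A's per-element boolean-list construction + all() with one aggregate: empty ⇒ True, else max(values) < 0 (simpler decomposition, same cost).

-- ===== PORT A =====
-- A: build a boolean per element, then all() over that list.
def is_all_minus (values : List Int) : Bool :=
  let bool_arrays := values.foldl (fun acc value =>
    if value < 0 then acc ++ [true] else acc ++ [false]) ([] : List Bool)
  bool_arrays.all (fun b => b)

-- ===== PORT B =====
-- B: `not values or max(values) < 0` — empty ⇒ True, else max(values) < 0.
def is_all_minus_alt (values : List Int) : Bool :=
  if values.isEmpty then true
  else
    match PySem.List.max? values (fun y => y) with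
    | some m => decide (m < 0)
    | none => true

-- ===== PRECONDITION & SPEC =====
def Spec_is_all_minus (values : List Int) (out : Bool) : Prop := out = is_all_minus_alt values
instance (values : List Int) (out : Bool) : Decidable (Spec_is_all_minus values out) := by unfold Spec_is_all_minus; infer_instance

-- ===== CLAIM (what is proved, stated in full; the proofs are below) =====
def Claim_equal_is_all_minus : Prop := ∀ (values : List Int), Dom_is_all_minus values → Spec_is_all_minus values (is_all_minus values)

-- ===== LEMMAS AND PROOFS =====
lemma is_all_minus_aux (values : List Int) : ∀ (acc : List Bool),
    (values.foldl (fun acc value =>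
      if value < 0 then acc ++ [true] else acc ++ [false]) acc).all (fun b => b)
    = (acc.all (fun b => b) && values.all (fun v => decide (v < 0))) := by
  induction values with
  | nil => intro acc; simp
  | cons x t ih =>
    intro acc
    by_cases hx : x < 0 <;>
      simp only [List.foldl_cons, hx, if_true, if_false, ih, List.all_append,
        List.all_cons, List.all_nil, decide_true, decide_false, Bool.and_true,
        Bool.and_false, Bool.false_and, Bool.true_and, Bool.and_assoc]

lemma is_all_minus_eq_all (values : List Int) :
    is_all_minus values = values.all (fun v => decide (v < 0)) := by
  show (values.foldl _ ([] : List Bool)).all (fun b => b) = _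
  rw [is_all_minus_aux]
  simp

lemma foldl_max_lt_zero (t : List Int) : ∀ (x : Int),
    decide (t.foldl max x < 0) = (decide (x < 0) && t.all (fun v => decide (v < 0))) := by
  induction t with
  | nil => intro x; simp
  | cons y t ih =>
    intro x
    rw [List.foldl_cons, ih (max x y), List.all_cons, ← Bool.and_assoc]
    congr 1
    by_cases h : x < 0 <;> by_cases h2 : y < 0 <;> simp [h, h2, max_def] <;> omega

-- ===== VERDICT (by name: the statement is the Claim_ definition above) =====
theorem is_all_minus_spec : Claim_equal_is_all_minus := by
  intro values _
  unfold Spec_is_all_minus is_all_minus_alt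
  rw [is_all_minus_eq_all]
  cases values with
  | nil => simp
  | cons x t =>
    rw [PySem.List.max?_id_cons]
    simp only [List.isEmpty_cons, if_false, Bool.false_eq_true, List.all_cons]
    exact (foldl_max_lt_zero t x).symm
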